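-- pv_equiv track=rewrite | github.com/tanadrin/sgen | core/syllabification.py | expand_category_in_rule
-- ===== SOURCE A (Python) =====
-- from typing import Dict, List, Tuple, Optional
--
-- def expand_category_in_rule(rule_part: str, categories: Dict[str, List[str]]) -> List[str]:
--     """Expand a rule part that might contain categories into concrete strings."""
--     if len(rule_part) == 1 and rule_part in categories:
--         # Single category
--         return categories[rule_part]
--     else:
--         # Check if it contains categories mixed with literals
--         result = []
--         expanded_parts = [[]]
--
--         for char in rule_part:
--             if char in categories:
--                 # Expand this category
--                 new_expanded_parts = []
--                 for existing_part in expanded_parts: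
--                     for category_char in categories[char]:
--                         new_expanded_parts.append(existing_part + [category_char])
--                 expanded_parts = new_expanded_parts
--             else:
--                 # Literal character
--                 for part in expanded_parts:
--                     part.append(char)
--
--         # Convert back to strings
--         result = [''.join(part) for part in expanded_parts]
--         return result
-- ===== SOURCE B (Python) =====
-- def expand_category_in_rule(rule_part: str, categories) -> list:
--     """Mixed-radix enumeration: compute per-position option lists, count the
--     results, and decode each output index k digit by digit (rightmost fastest)."""
--     opts = [categories[ch] if ch in categories else [ch] for ch in rule_part]
--     total = 1
--     for o in opts:
--         total *= len(o)
--     out = []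
--     for k in range(total):
--         chars = []
--         r = k
--         for o in reversed(opts):
--             r, d = divmod(r, len(o))
--             chars.append(o[d])
--         out.append(''.join(reversed(chars)))
--     return out
-- ===== Notes on version B (the rewrite author's own statement) =====
-- stated objective: alternative
-- what changed: Replaced A's incremental list-of-lists Cartesian accumulator (with in-place literal appends and a single-category fast path) by mixed-radix index decoding: build per-position option lists, count the outputs, and decode each output index k with divmod into one digit per position.
import Mathlib
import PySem

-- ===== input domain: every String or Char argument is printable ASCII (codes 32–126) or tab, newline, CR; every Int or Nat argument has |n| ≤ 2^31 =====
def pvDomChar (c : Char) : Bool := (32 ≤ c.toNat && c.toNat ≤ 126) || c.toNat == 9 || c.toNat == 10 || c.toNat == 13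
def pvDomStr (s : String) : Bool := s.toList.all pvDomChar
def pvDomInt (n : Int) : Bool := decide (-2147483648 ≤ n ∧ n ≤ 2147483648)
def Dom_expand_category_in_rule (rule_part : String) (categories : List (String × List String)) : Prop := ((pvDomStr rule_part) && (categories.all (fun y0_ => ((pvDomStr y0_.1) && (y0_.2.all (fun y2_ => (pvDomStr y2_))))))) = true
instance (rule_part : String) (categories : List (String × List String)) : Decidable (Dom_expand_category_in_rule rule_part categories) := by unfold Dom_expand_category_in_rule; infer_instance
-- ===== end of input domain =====

-- B replaces A's incremental list-of-lists Cartesian accumulator by mixed-radix index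
-- decoding (count the outputs, decode each index with divmod): an alternative algorithm.

-- dict lookup (first match, as a Python dict key lookup / 'in' test)
def pvLookup (categories : List (String × List String)) (k : String) : Option (List String) :=
  (categories.find? (fun p => p.1 == k)).map (·.2)

-- ===== PORT A =====
-- one iteration of A's 'for char in rule_part' loop over the expanded_parts state
def pvStepA (categories : List (String × List String)) (expanded : List (List String)) (c : Char) : List (List String) :=
  match pvLookup categories (String.ofList [c]) with
  | some cat => expanded.foldl (fun acc ex => acc ++ cat.map (fun s => ex ++ [s])) []
  | none => expanded.map (fun part => part ++ [String.ofList [c]])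

def expand_category_in_rule (rule_part : String) (categories : List (String × List String)) : List String :=
  if rule_part.toList.length = 1 ∧ (pvLookup categories rule_part).isSome then
    (pvLookup categories rule_part).getD []
  else
    (rule_part.toList.foldl (pvStepA categories) [[]]).map (fun part => String.join part)

-- ===== PORT B =====
-- 'opts = [categories[ch] if ch in categories else [ch] for ch in rule_part]'
def pvOptsB (categories : List (String × List String)) (l : List Char) : List (List String) :=
  l.map (fun c => match pvLookup categories (String.ofList [c]) with
    | some v => v
    | none => [String.ofList [c]])

-- one iteration of Source B's 'for o in reversed(opts)' loop, state = (r, chars);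
-- Python's divmod is ported by floordiv/mod (total here; the loop is only executed
-- with r ≥ 0 and, whenever range(total) is nonempty, every len(o) > 0)
def pvStepB (s : Int × List String) (o : List String) : Int × List String :=
  (PySem.Int.floordiv s.1 (Int.ofNat o.length),
   s.2 ++ [(PySem.List.pyGet? o (PySem.Int.mod s.1 (Int.ofNat o.length))).getD ""])

-- the body of Source B's 'for k in range(total)' loop: decode index k
def pvDecodeB (opts : List (List String)) (k : Int) : String :=
  String.join ((opts.reverse.foldl pvStepB (k, [])).2).reverse

def expand_category_in_rule_alt (rule_part : String) (categories : List (String × List String)) : List String :=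
  (PySem.List.pyRange 0
      ((pvOptsB categories rule_part.toList).foldl (fun t o => t * (Int.ofNat o.length)) 1) 1).map
    (fun k => pvDecodeB (pvOptsB categories rule_part.toList) k)

-- ===== PRECONDITION & SPEC =====
def Spec_expand_category_in_rule (rule_part : String) (categories : List (String × List String)) (out : List String) : Prop := out = expand_category_in_rule_alt rule_part categories
instance (rule_part : String) (categories : List (String × List String)) (out : List String) : Decidable (Spec_expand_category_in_rule rule_part categories out) := by unfold Spec_expand_category_in_rule; infer_instance

-- ===== CLAIM =====
def Claim_equal_expand_category_in_rule : Prop := ∀ (rule_part : String) (categories : List (String × List String)), Dom_expand_category_in_rule rule_part categories → Spec_expand_category_in_rule rule_part categories (expand_category_in_rule rule_part categories)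

-- ===== LEMMAS AND PROOFS =====

-- product of the option-list lengths
def pvProdNat : List (List String) → Nat
  | [] => 1
  | o :: r => o.length * pvProdNat r

-- the mathematical Cartesian product, the common reference point of both proofs
def pvProduct : List (List String) → List String
  | [] => [""]
  | o :: r => o.flatMap (fun s => (pvProduct r).map (fun t => s ++ t))

-- pure form of the digit string Source B's inner loop extracts from index m
def pvDigits : List (List String) → Nat → List String
  | [], _ => []
  | o :: r, m => pvDigits r m ++ [o.getD (m / pvProdNat r % o.length) ""]

theorem pvProduct_length (opts : List (List String)) :
    (pvProduct opts).length = pvProdNat opts := by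
  induction opts with
  | nil => rfl
  | cons o r ih =>
    simp [pvProduct, pvProdNat, ih, List.length_flatMap,
      List.map_const', mul_comm]

theorem pvFoldr_stepB (opts : List (List String)) (hpos : ∀ o ∈ opts, 0 < o.length)
    (m : Nat) (acc : List String) :
    opts.foldr (fun o s => pvStepB s o) ((m : Int), acc)
      = ((↑(m / pvProdNat opts) : Int), acc ++ pvDigits opts m) := by
  induction opts generalizing acc with
  | nil => simp [pvProdNat, pvDigits]
  | cons o r ih =>
    have hro : ∀ x ∈ r, 0 < x.length := fun x hx => hpos x (List.mem_cons_of_mem _ hx)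
    have ho : 0 < o.length := hpos o (List.mem_cons_self)
    rw [List.foldr_cons, ih hro]
    unfold pvStepB
    have h1 : PySem.Int.floordiv (↑(m / pvProdNat r)) (Int.ofNat o.length)
        = ((m / pvProdNat r / o.length : Nat) : Int) := by
      exact_mod_cast PySem.Int.floordiv_natCast _ _
    have h2 : PySem.Int.mod (↑(m / pvProdNat r)) (Int.ofNat o.length)
        = ((m / pvProdNat r % o.length : Nat) : Int) := by
      exact_mod_cast PySem.Int.mod_natCast _ _
    rw [h1, h2]
    have h3 : (PySem.List.pyGet? o ((m / pvProdNat r % o.length : Nat) : Int)).getD ""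
        = o.getD (m / pvProdNat r % o.length) "" := by
      rw [PySem.List.pyGet?_natCast, List.getD_eq_getElem?_getD]
    rw [h3]
    simp [pvProdNat, pvDigits, Nat.div_div_eq_div_mul, Nat.mul_comm]

theorem pvDigits_period (r : List (List String)) (i j : Nat) :
    pvDigits r (j + i * pvProdNat r) = pvDigits r j := by
  induction r generalizing i with
  | nil => rfl
  | cons o r' ih =>
    by_cases hP : pvProdNat r' = 0
    · simp [pvProdNat, hP]
    · have hP' : 0 < pvProdNat r' := Nat.pos_of_ne_zero hP
      have e1 : j + i * pvProdNat (o :: r') = j + (i * o.length) * pvProdNat r' := by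
        simp [pvProdNat]; ring
      rw [e1]
      unfold pvDigits
      rw [ih (i * o.length)]
      congr 2
      rw [Nat.add_mul_div_right _ _ hP', Nat.add_mul_mod_self_right]

theorem pvRange_mul (n P : Nat) :
    List.range (n * P) = (List.range n).flatMap (fun i => (List.range P).map (fun j => i * P + j)) := by
  induction n with
  | zero => simp
  | succ n ih =>
    rw [Nat.succ_mul, List.range_add, ih, List.range_succ]
    simp [List.flatMap_append]

theorem pvRange_map_getD (o : List String) :
    (List.range o.length).map (fun i => o.getD i "") = o := by
  apply List.ext_getElem
  · simp
  · intro i h1 h2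
    simp [List.getD_eq_getElem?_getD, List.getElem?_eq_getElem h2]

theorem pvJoin_foldl (a : String) (l : List String) :
    l.foldl (fun x y => x ++ y) a = a ++ l.foldl (fun x y => x ++ y) "" := by
  induction l generalizing a with
  | nil => simp
  | cons s t ih => rw [List.foldl_cons, List.foldl_cons, ih, ih ("" ++ s)]
                   simp [String.append_assoc]

theorem pvJoin_cons (s : String) (l : List String) :
    String.join (s :: l) = s ++ String.join l := by
  simp [String.join, List.foldl_cons, pvJoin_foldl s l]

theorem pvDecode_all (opts : List (List String)) :
    (List.range (pvProdNat opts)).map (fun m => String.join (pvDigits opts m).reverse)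
      = pvProduct opts := by
  induction opts with
  | nil => simp [pvProdNat, pvDigits, pvProduct, List.range_succ, String.join]
  | cons o r ih =>
    by_cases hn : o.length = 0
    · have : o = [] := List.length_eq_zero_iff.mp hn
      simp [pvProdNat, this, pvProduct]
    by_cases hP : pvProdNat r = 0
    · have hpr : pvProduct r = [] :=
        List.eq_nil_of_length_eq_zero (by rw [pvProduct_length, hP])
      simp [pvProdNat, hP, pvProduct, hpr]
    have hn' : 0 < o.length := Nat.pos_of_ne_zero hn
    have hP' : 0 < pvProdNat r := Nat.pos_of_ne_zero hP
    show (List.range (pvProdNat (o :: r))).map _ = _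
    rw [show pvProdNat (o :: r) = o.length * pvProdNat r from rfl, pvRange_mul,
      List.map_flatMap]
    have key : ∀ i ∈ List.range o.length,
        ((List.range (pvProdNat r)).map (fun j => i * pvProdNat r + j)).map
            (fun m => String.join (pvDigits (o :: r) m).reverse)
          = (pvProduct r).map (fun t => o.getD i "" ++ t) := by
      intro i hi
      have hi' : i < o.length := List.mem_range.mp hi
      rw [List.map_map, ← ih, List.map_map]
      apply List.map_congr_left
      intro j hj
      have hj' : j < pvProdNat r := List.mem_range.mp hj
      have e1 : i * pvProdNat r + j = j + i * pvProdNat r := by ring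
      have e2 : pvDigits r (j + i * pvProdNat r) = pvDigits r j := pvDigits_period r i j
      have e3 : (j + i * pvProdNat r) / pvProdNat r = i :=
        by rw [Nat.add_mul_div_right _ _ hP', Nat.div_eq_of_lt hj', Nat.zero_add]
      simp only [Function.comp_apply, e1]
      show String.join (pvDigits (o :: r) (j + i * pvProdNat r)).reverse = _
      show String.join (pvDigits r (j + i * pvProdNat r)
          ++ [o.getD ((j + i * pvProdNat r) / pvProdNat r % o.length) ""]).reverse = _
      rw [e2, e3, Nat.mod_eq_of_lt hi', List.reverse_append, List.reverse_singleton,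
        List.singleton_append, pvJoin_cons]
    rw [List.flatMap_congr key]
    calc (List.range o.length).flatMap (fun i => (pvProduct r).map (fun t => o.getD i "" ++ t))
        = ((List.range o.length).map (fun i => o.getD i "")).flatMap
            (fun s => (pvProduct r).map (fun t => s ++ t)) := by
          rw [List.flatMap_map]
      _ = o.flatMap (fun s => (pvProduct r).map (fun t => s ++ t)) := by
          rw [pvRange_map_getD]
      _ = pvProduct (o :: r) := rfl

theorem pvTotal_cast (opts : List (List String)) (a : Nat) :
    opts.foldl (fun t o => t * (Int.ofNat o.length)) (↑a : Int) = ↑(a * pvProdNat opts) := by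
  induction opts generalizing a with
  | nil => simp [pvProdNat]
  | cons o r ih =>
    rw [List.foldl_cons]
    have h : (↑a : Int) * Int.ofNat o.length = ((a * o.length : Nat) : Int) := by
      simp [Int.ofNat_eq_natCast]
    rw [h, ih]
    congr 1
    simp [pvProdNat]; ring

theorem pvProdNat_eq_zero {opts : List (List String)} {o : List String}
    (ho : o ∈ opts) (h : o.length = 0) : pvProdNat opts = 0 := by
  induction opts with
  | nil => cases ho
  | cons x r ih =>
    rcases List.mem_cons.mp ho with hx | hx
    · subst hx; simp [pvProdNat, h]
    · simp [pvProdNat, ih hx]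

theorem pvAlt_eq_product (rule_part : String) (categories : List (String × List String)) :
    expand_category_in_rule_alt rule_part categories
      = pvProduct (pvOptsB categories rule_part.toList) := by
  unfold expand_category_in_rule_alt
  generalize pvOptsB categories rule_part.toList = opts
  have htot : opts.foldl (fun t o => t * (Int.ofNat o.length)) 1 = ↑(pvProdNat opts) := by
    have := pvTotal_cast opts 1
    simpa using this
  rw [htot]
  have hrange : PySem.List.pyRange 0 (↑(pvProdNat opts)) 1
      = (List.range (pvProdNat opts)).map (fun m => Int.ofNat m) := by
    rw [PySem.List.pyRange_one]
    simp only [Int.sub_zero, Int.toNat_natCast]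
    apply List.map_congr_left
    intro k _
    simp
  rw [hrange, List.map_map]
  by_cases hpos : ∀ o ∈ opts, 0 < o.length
  · rw [← pvDecode_all opts]
    apply List.map_congr_left
    intro m _
    simp only [Function.comp_apply]
    show pvDecodeB opts ↑m = _
    unfold pvDecodeB
    rw [List.foldl_reverse, pvFoldr_stepB opts hpos m []]
    simp
  · push_neg at hpos
    obtain ⟨o, ho, hlen⟩ := hpos
    have hprod : pvProdNat opts = 0 := pvProdNat_eq_zero ho (Nat.le_zero.mp hlen)
    have hpr : pvProduct opts = [] :=
      List.eq_nil_of_length_eq_zero (by rw [pvProduct_length, hprod])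
    rw [hprod, hpr]
    simp

-- ===== A-side lemmas =====

-- the recursive Cartesian expansion A's loop computes, per character
def pvExpandCh (categories : List (String × List String)) : List Char → List String
  | [] => [""]
  | c :: rest =>
    let opts := (pvLookup categories (String.ofList [c])).getD [String.ofList [c]]
    let tails := pvExpandCh categories rest
    opts.flatMap (fun o => tails.map (fun t => o ++ t))

theorem pvFlattenSingletons {A B : Type} (f : A → B) (v : List A) :
    (v.map (fun o => [f o])).flatten = v.map f := by
  induction v with
  | nil => rfl
  | cons a t ih => simp [ih]

theorem pvJoin_append_singleton (xs : List String) (s : String) :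
    String.join (xs ++ [s]) = String.join xs ++ s := by
  simp [String.join, List.foldl_append]

-- A's loop from any accumulator state computes pvExpandCh prefixed by the joined states
theorem pvKey (categories : List (String × List String)) (l : List Char) :
    ∀ S : List (List String),
      (l.foldl (pvStepA categories) S).map String.join
        = S.flatMap (fun p => (pvExpandCh categories l).map (fun t => String.join p ++ t)) := by
  induction l with
  | nil =>
    intro S
    simp [pvExpandCh, List.flatMap, pvFlattenSingletons]
  | cons c l ih =>
    intro S
    rw [List.foldl_cons, ih]
    simp only [pvExpandCh]
    unfold pvStepA
    cases h : pvLookup categories (String.ofList [c]) with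
    | some cat =>
      simp only [Option.getD_some]
      rw [PySem.List.foldl_append_eq_flatMap]
      simp only [List.nil_append, List.flatMap_assoc, List.flatMap_map, List.map_flatMap,
        List.map_map]
      apply List.flatMap_congr ; intro p _
      apply List.flatMap_congr ; intro s _
      simp [Function.comp, pvJoin_append_singleton, String.append_assoc]
    | none =>
      simp only [Option.getD_none]
      simp only [List.flatMap_map, List.map_map, List.flatMap_cons,
        List.flatMap_nil, List.append_nil]
      apply List.flatMap_congr ; intro p _
      simp [Function.comp, pvJoin_append_singleton, String.append_assoc]

theorem pvExpandCh_eq_product (categories : List (String × List String)) (l : List Char) :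
    pvExpandCh categories l = pvProduct (pvOptsB categories l) := by
  induction l with
  | nil => rfl
  | cons c rest ih =>
    show ((pvLookup categories (String.ofList [c])).getD [String.ofList [c]]).flatMap _ = _
    cases h : pvLookup categories (String.ofList [c]) with
    | some v => simp [pvOptsB, pvProduct, h, ih]
    | none => simp [pvOptsB, pvProduct, h, ih]

theorem pvBody_eq (rule_part : String) (categories : List (String × List String)) :
    (rule_part.toList.foldl (pvStepA categories) [[]]).map (fun part => String.join part)
      = pvExpandCh categories rule_part.toList := by
  rw [pvKey]
  simp [String.join]

-- ===== VERDICT =====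
theorem expand_category_in_rule_spec : Claim_equal_expand_category_in_rule := by
  intro rule_part categories _
  show expand_category_in_rule rule_part categories = expand_category_in_rule_alt rule_part categories
  rw [pvAlt_eq_product, ← pvExpandCh_eq_product]
  unfold expand_category_in_rule
  split
  · next hcond =>
    obtain ⟨hlen, hsome⟩ := hcond
    obtain ⟨c, hc⟩ : ∃ c, rule_part.toList = [c] := by
      cases hl : rule_part.toList with
      | nil => simp [hl] at hlen
      | cons a t =>
        cases t with
        | nil => exact ⟨a, rfl⟩
        | cons b t' => simp [hl] at hlen
    have hmk : String.ofList [c] = rule_part := by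
      rw [← hc, String.ofList_toList]
    obtain ⟨v, hv⟩ := Option.isSome_iff_exists.mp hsome
    rw [hc]
    simp [pvExpandCh, hmk, hv, List.flatMap, pvFlattenSingletons]
  · exact pvBody_eq rule_part categories
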